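-- pv_equiv track=rewrite | github.com/vl2g/visToT | data_wikilandmark/generate_header_vocab.py | add_vocab
-- ===== SOURCE A (Python) =====
-- def add_vocab(table, header_vocab):
--     for slot_key, slot_val in table.items():
--         if not slot_val:
--             continue
--         formatted_slot_key = '__' + '_'.join(slot_key.split()).strip('_') + '__'
--         if formatted_slot_key not in header_vocab:
--             header_vocab[formatted_slot_key] = 1
--         elif header_vocab[formatted_slot_key] <= 50000:
--             header_vocab[formatted_slot_key] += 1
--     return header_vocab
-- ===== SOURCE B (Python) =====
-- def _format_key(slot_key):
--     return '__' + '_'.join(slot_key.split()).strip('_') + '__'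
--
--
-- def add_vocab(table, header_vocab):
--     # Pass 1: count occurrences of each formatted key (truthy values only).
--     counts = {}
--     for slot_key, slot_val in table.items():
--         if slot_val:
--             fkey = _format_key(slot_key)
--             counts[fkey] = counts.get(fkey, 0) + 1
--     # Pass 2: merge each distinct key once, with a closed-form saturating cap.
--     for fkey, c in counts.items():
--         v = header_vocab.get(fkey, 0)
--         if v <= 50000:
--             header_vocab[fkey] = min(v + c, 50001)
--     return header_vocab
-- ===== Notes on version B (the rewrite author's own statement) =====
-- stated objective: alternative
-- what changed: B replaces A's per-occurrence incremental dict updates with two passes: it first counts each formatted key once into a counter dict, then merges every distinct key into header_vocab with a single closed-form saturating update min(v + count, 50001), skipping keys whose existing value exceeds 50000.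
import Mathlib
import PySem

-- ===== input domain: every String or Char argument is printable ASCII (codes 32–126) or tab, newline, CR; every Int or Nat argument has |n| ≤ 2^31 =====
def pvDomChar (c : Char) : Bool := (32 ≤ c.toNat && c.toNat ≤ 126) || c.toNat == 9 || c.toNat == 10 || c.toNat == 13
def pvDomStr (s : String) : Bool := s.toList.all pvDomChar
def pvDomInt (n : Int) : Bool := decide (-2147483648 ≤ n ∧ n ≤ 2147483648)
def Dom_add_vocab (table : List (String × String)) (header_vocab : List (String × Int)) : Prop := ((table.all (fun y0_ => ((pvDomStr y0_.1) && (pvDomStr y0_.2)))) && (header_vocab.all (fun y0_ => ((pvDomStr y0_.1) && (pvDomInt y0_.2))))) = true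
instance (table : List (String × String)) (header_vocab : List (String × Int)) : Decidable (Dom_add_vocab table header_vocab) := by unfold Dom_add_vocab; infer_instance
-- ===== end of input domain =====

-- B replaces A's per-occurrence incremental updates with count-once-then-merge using a
-- closed-form saturating cap; same return value (and A/B both mutate header_vocab in Python —
-- the resulting dict contents are identical, so the equivalence covers that state too).

-- '__' + '_'.join(slot_key.split()).strip('_') + '__'   (identical expression in Source A and Source B)
def pvFmt (slot_key : String) : String :=
  "__" ++ PySem.Str.stripChars (PySem.Str.join "_" (PySem.Str.split₀ slot_key)) "_" ++ "__"

-- ===== PORT A =====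
def add_vocab (table : List (String × String)) (header_vocab : List (String × Int)) : List (String × Int) :=
  (table.foldl (fun d p =>
      if p.2 == "" then d            -- 'if not slot_val: continue'
      else
        let fkey := pvFmt p.1
        if !(d.contains fkey) then d.insert fkey 1
        else if d.getD fkey 0 ≤ 50000 then d.insert fkey (d.getD fkey 0 + 1)
        else d)
    (PySem.Dict.mk header_vocab)).items

-- ===== PORT B =====
def add_vocab_alt (table : List (String × String)) (header_vocab : List (String × Int)) : List (String × Int) :=
  let counts : PySem.Dict String Int :=
    table.foldl (fun c p =>
        if p.2 == "" then c
        else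
          let fkey := pvFmt p.1
          c.insert fkey (c.getD fkey 0 + 1))
      PySem.Dict.empty
  (counts.items.foldl (fun d q =>
      let v := d.getD q.1 0
      if v ≤ 50000 then d.insert q.1 (min (v + q.2) 50001) else d)
    (PySem.Dict.mk header_vocab)).items

-- ===== PRECONDITION & SPEC =====
def Spec_add_vocab (table : List (String × String)) (header_vocab : List (String × Int)) (out : List (String × Int)) : Prop := out = add_vocab_alt table header_vocab
instance (table : List (String × String)) (header_vocab : List (String × Int)) (out : List (String × Int)) : Decidable (Spec_add_vocab table header_vocab out) := by unfold Spec_add_vocab; infer_instance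

-- ===== CLAIM (what is proved, stated in full; the proofs are below) =====
def Claim_equal_add_vocab : Prop := ∀ (table : List (String × String)) (header_vocab : List (String × Int)), Dom_add_vocab table header_vocab → Spec_add_vocab table header_vocab (add_vocab table header_vocab)

-- ===== LEMMAS AND PROOFS =====

-- A's per-key update (after the truthiness filter and formatting).
def aStep (d : PySem.Dict String Int) (k : String) : PySem.Dict String Int :=
  if !(d.contains k) then d.insert k 1
  else if d.getD k 0 ≤ 50000 then d.insert k (d.getD k 0 + 1)
  else d

-- B's per-distinct-key merge with multiplicity c.
def mStep (d : PySem.Dict String Int) (k : String) (c : Int) : PySem.Dict String Int :=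
  if d.getD k 0 ≤ 50000 then d.insert k (min (d.getD k 0 + c) 50001) else d

-- The stream of formatted keys both programs process.
def fkeys (table : List (String × String)) : List String :=
  (table.filter (fun p => !(p.2 == ""))).map (fun p => pvFmt p.1)

lemma getD_gt_contains (d : PySem.Dict String Int) (k : String)
    (h : 50000 < d.getD k 0) : d.contains k = true := by
  by_cases hc : d.contains k = true
  · exact hc
  · rw [PySem.Dict.getD_of_not_contains d 0 (by simpa using hc)] at h; omega

lemma contains_mStep_self (d : PySem.Dict String Int) (k : String) (c : Int) :
    (mStep d k c).contains k = true := by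
  unfold mStep
  split_ifs with h
  · exact PySem.Dict.contains_insert_self _ _ _
  · exact getD_gt_contains d k (by omega)

lemma dict_insert_comm (d : PySem.Dict String Int) (k k' : String) (v w : Int)
    (hne : k ≠ k') (hc : d.contains k = true) :
    (d.insert k' w).insert k v = (d.insert k v).insert k' w := by
  have h1 : (d.insert k' w).contains k = true := by
    rw [PySem.Dict.contains_insert]; simp [hc]
  have h2 : (d.insert k v).contains k' = d.contains k' := by
    rw [PySem.Dict.contains_insert]; simp [Ne.symm hne]
  by_cases hc' : d.contains k' = true
  · apply PySem.Dict.ext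
    rw [PySem.Dict.items_insert_of_contains _ v h1,
      PySem.Dict.items_insert_of_contains _ w hc',
      PySem.Dict.items_insert_of_contains _ w (h2.trans hc'),
      PySem.Dict.items_insert_of_contains _ v hc]
    rw [List.map_map, List.map_map]
    refine List.map_congr_left (fun p _ => ?_)
    by_cases e1 : p.1 = k' <;> by_cases e2 : p.1 = k <;>
      simp_all [Function.comp, Ne.symm hne]
  · have hc'' : d.contains k' = false := by simpa using hc'
    apply PySem.Dict.ext
    rw [PySem.Dict.items_insert_of_contains _ v h1,
      PySem.Dict.items_insert_of_not_contains _ w hc'',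
      PySem.Dict.items_insert_of_not_contains _ w (h2.trans hc''),
      PySem.Dict.items_insert_of_contains _ v hc]
    simp [Ne.symm hne]

-- final formatted-key occurrence: one more aStep is one unit more of mStep
lemma mStep_succ (d : PySem.Dict String Int) (k : String) (c : Int) :
    mStep d k (c + 1) = aStep (mStep d k c) k := by
  unfold mStep aStep
  by_cases hv : d.getD k 0 ≤ 50000
  · simp only [hv, if_true]
    have hcontains : (d.insert k (min (d.getD k 0 + c) 50001)).contains k = true :=
      PySem.Dict.contains_insert_self _ _ _
    have hget : (d.insert k (min (d.getD k 0 + c) 50001)).getD k 0 = min (d.getD k 0 + c) 50001 :=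
      PySem.Dict.getD_insert_self _ _ _ _
    rw [hcontains, hget]
    by_cases hw : d.getD k 0 + c ≤ 50000
    · have : min (d.getD k 0 + c) 50001 = d.getD k 0 + c := by omega
      rw [this]
      simp only [if_pos hw, Bool.not_true, Bool.false_eq_true, if_false]
      rw [PySem.Dict.insert_insert_self]
      congr 1; omega
    · have h1 : min (d.getD k 0 + c) 50001 = (50001 : Int) := by omega
      have h2 : min (d.getD k 0 + (c + 1)) 50001 = (50001 : Int) := by omega
      rw [h1, h2]
      simp
  · have hc : d.contains k = true := getD_gt_contains d k (by omega)
    simp [hv, hc]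

lemma aStep_eq_mStep_one (d : PySem.Dict String Int) (k : String) :
    aStep d k = mStep d k 1 := by
  unfold aStep mStep
  by_cases hc : d.contains k = true
  · simp only [hc, Bool.not_true, Bool.false_eq_true, if_false]
    by_cases hv : d.getD k 0 ≤ 50000
    · rw [if_pos hv, if_pos hv]
      congr 1; omega
    · rw [if_neg hv, if_neg hv]
  · have hb : d.contains k = false := by simpa using hc
    rw [PySem.Dict.getD_of_not_contains d 0 hb]
    simp [hb]

lemma aStep_mStep_comm (d : PySem.Dict String Int) (k k' : String) (c : Int)
    (hne : k ≠ k') (hc : d.contains k = true) :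
    aStep (mStep d k' c) k = mStep (aStep d k) k' c := by
  have hgk : ∀ w, (d.insert k' w).getD k 0 = d.getD k 0 :=
    fun w => PySem.Dict.getD_insert_of_ne d w 0 hne
  have hgk' : ∀ v, (d.insert k v).getD k' 0 = d.getD k' 0 :=
    fun v => PySem.Dict.getD_insert_of_ne d v 0 (Ne.symm hne)
  have hck : ∀ w, (d.insert k' w).contains k = true := by
    intro w; rw [PySem.Dict.contains_insert]; simp [hc]
  have hck' : ∀ v, (d.insert k v).contains k' = d.contains k' := by
    intro v; rw [PySem.Dict.contains_insert]; simp [Ne.symm hne]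
  unfold aStep mStep
  by_cases hv' : d.getD k' 0 ≤ 50000
  · by_cases hv : d.getD k 0 ≤ 50000
    · simp only [hv', if_true, hgk, hgk', hck, hc, Bool.not_true, Bool.false_eq_true, if_false,
        hv]
      exact dict_insert_comm d k k' _ _ hne hc
    · simp only [hv', if_true, hgk, hck, hc, Bool.not_true, Bool.false_eq_true, if_false, hv]
  · by_cases hv : d.getD k 0 ≤ 50000
    · simp only [hv', if_false, hgk', hc, Bool.not_true, Bool.false_eq_true, hv, if_true]
    · simp only [hv', if_false, hc, Bool.not_true, Bool.false_eq_true, hv]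

-- pull a pending aStep at k (k already present) out of a merge fold over keys ≠ k
lemma foldl_mStep_aStep_comm (f : String → Int) (l : List String) (d : PySem.Dict String Int)
    (k : String) (hk : k ∉ l) (hc : d.contains k = true) :
    l.foldl (fun d k' => mStep d k' (f k')) (aStep d k)
      = aStep (l.foldl (fun d k' => mStep d k' (f k')) d) k := by
  induction l generalizing d with
  | nil => simp
  | cons x xs ih =>
    have hne : k ≠ x := fun h => hk (h ▸ List.mem_cons_self)
    have hk' : k ∉ xs := fun h => hk (List.mem_cons_of_mem _ h)
    have hc' : (mStep d x (f x)).contains k = true := by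
      unfold mStep
      split_ifs
      · rw [PySem.Dict.contains_insert]; simp [hc]
      · exact hc
    simp only [List.foldl_cons]
    rw [← aStep_mStep_comm d k x (f x) hne hc, ih _ hk' hc']

-- counts with/without the last occurrence of k agree away from k
lemma count_append_singleton_ne (ks : List String) (k x : String) (hne : x ≠ k) :
    (ks ++ [k]).count x = ks.count x := by
  simp [List.count_append, Ne.symm hne]

-- THE MAIN LEMMA: A's incremental fold = B's merge of the counter
lemma main_fold (ks : List String) (d : PySem.Dict String Int) :
    ks.foldl aStep d
      = (PySem.Set.ofList ks).foldl (fun d k => mStep d k ((ks.count k : Int))) d := by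
  induction ks using List.reverseRecOn generalizing d with
  | nil => simp [PySem.Set.ofList]
  | append_singleton ks k ih =>
    rw [List.foldl_append, List.foldl_cons, List.foldl_nil,
      PySem.Set.ofList_append_singleton]
    by_cases hk : k ∈ ks
    · rw [PySem.Set.add_of_mem ((PySem.Set.mem_ofList ks k).mpr hk)]
      obtain ⟨pre, suf, hsplit⟩ := List.append_of_mem ((PySem.Set.mem_ofList ks k).mpr hk)
      have hnd : (pre ++ k :: suf).Nodup := hsplit ▸ PySem.Set.nodup_ofList ks
      have hkpre : k ∉ pre := fun h =>
        (List.disjoint_of_nodup_append hnd) h List.mem_cons_self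
      have hksuf : k ∉ suf := by
        have := (List.nodup_append.mp hnd).2.1
        exact (List.nodup_cons.mp this).1
      rw [ih, hsplit]
      rw [List.foldl_append, List.foldl_append, List.foldl_cons, List.foldl_cons]
      have hpre : pre.foldl (fun d k' => mStep d k' (((ks ++ [k]).count k' : Int))) d
          = pre.foldl (fun d k' => mStep d k' ((ks.count k' : Int))) d := by
        refine PySem.List.foldl_congr_mem _ _ _ _ (fun acc x hx => ?_)
        rw [count_append_singleton_ne ks k x (fun h => hkpre (h ▸ hx))]
      rw [hpre]
      set d1 := pre.foldl (fun d k' => mStep d k' ((ks.count k' : Int))) d with hd1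
      have hmid : mStep d1 k (((ks ++ [k]).count k : Int))
          = aStep (mStep d1 k ((ks.count k : Int))) k := by
        have : ((ks ++ [k]).count k : Int) = (ks.count k : Int) + 1 := by
          simp [List.count_append]
        rw [this, mStep_succ]
      rw [hmid]
      have hsuf : ∀ (d0 : PySem.Dict String Int),
          suf.foldl (fun d k' => mStep d k' (((ks ++ [k]).count k' : Int))) d0
          = suf.foldl (fun d k' => mStep d k' ((ks.count k' : Int))) d0 := by
        intro d0
        refine PySem.List.foldl_congr_mem _ _ _ _ (fun acc x hx => ?_)
        rw [count_append_singleton_ne ks k x (fun h => hksuf (h ▸ hx))]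
      rw [hsuf]
      rw [foldl_mStep_aStep_comm _ suf _ k hksuf (contains_mStep_self d1 k _)]
    · rw [PySem.Set.add_of_not_mem (fun h => hk ((PySem.Set.mem_ofList ks k).mp h))]
      rw [List.foldl_append, List.foldl_cons, List.foldl_nil]
      have hcong : (PySem.Set.ofList ks).foldl
            (fun d k' => mStep d k' (((ks ++ [k]).count k' : Int))) d
          = (PySem.Set.ofList ks).foldl (fun d k' => mStep d k' ((ks.count k' : Int))) d := by
        refine PySem.List.foldl_congr_mem _ _ _ _ (fun acc x hx => ?_)
        rw [count_append_singleton_ne ks k x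
          (fun h => hk ((PySem.Set.mem_ofList ks k).mp (by rw [← h]; exact hx)))]
      rw [hcong, ← ih]
      have hcnt : ((ks ++ [k]).count k : Int) = 1 := by
        simp [List.count_append, List.count_eq_zero_of_not_mem hk]
      rw [hcnt, aStep_eq_mStep_one]

-- A's table loop is the aStep fold over the formatted-key stream
lemma add_vocab_eq_fold (table : List (String × String)) (d : PySem.Dict String Int) :
    table.foldl (fun d p =>
      if p.2 == "" then d
      else
        let fkey := pvFmt p.1
        if !(d.contains fkey) then d.insert fkey 1
        else if d.getD fkey 0 ≤ 50000 then d.insert fkey (d.getD fkey 0 + 1)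
        else d) d
    = (fkeys table).foldl aStep d := by
  induction table generalizing d with
  | nil => rfl
  | cons p ps ih =>
    by_cases hp : p.2 == ""
    · simp only [List.foldl_cons, hp, if_true]
      rw [ih]
      simp [fkeys, hp]
    · simp only [List.foldl_cons, hp, Bool.false_eq_true, if_false]
      rw [ih]
      simp [fkeys, hp, aStep]

-- B's counting loop is Counter over the same stream
lemma counts_eq_counter (table : List (String × String)) (c : PySem.Dict String Int) :
    table.foldl (fun c p =>
        if p.2 == "" then c
        else
          let fkey := pvFmt p.1
          c.insert fkey (c.getD fkey 0 + 1)) c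
    = (fkeys table).foldl (fun c x => c.insert x (c.getD x 0 + 1)) c := by
  induction table generalizing c with
  | nil => rfl
  | cons p ps ih =>
    by_cases hp : p.2 == ""
    · simp only [List.foldl_cons, hp, if_true]
      rw [ih]
      simp [fkeys, hp]
    · simp only [List.foldl_cons, hp, Bool.false_eq_true, if_false]
      rw [ih]
      simp [fkeys, hp]

-- ===== VERDICT (by name: the statement is the Claim_ definition above) =====
theorem add_vocab_spec : Claim_equal_add_vocab := by
  intro table header_vocab _
  unfold Spec_add_vocab add_vocab add_vocab_alt
  rw [add_vocab_eq_fold, counts_eq_counter,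
    PySem.Dict.foldl_insert_getD_add_one_eq_counter]
  simp only [PySem.Dict.items_counter, List.foldl_map]
  congr 1
  rw [main_fold]
  refine PySem.List.foldl_congr_mem _ _ _ _ (fun acc x _ => ?_)
  rfl
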